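-- pv_equiv track=rewrite | github.com/SproutSeeds/life-ops | src/life_ops/calendar.py | _featured_project_match
-- ===== SOURCE A (Python) =====
-- def _plain_text(value: object) -> str:
--     text = str(value or "")
--     replacements = {
--         "\u2010": "-",
--         "\u2011": "-",
--         "\u2012": "-",
--         "\u2013": "-",
--         "\u2014": "-",
--         "\u2212": "-",
--         "\u00b7": "/",
--         "\u2022": "*",
--         "\u2018": "'",
--         "\u2019": "'",
--         "\u201c": '"',
--         "\u201d": '"',
--         "\u2026": "...",
--     }
--     for old, new in replacements.items():
--         text = text.replace(old, new)
--     return " ".join(text.split())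
--
-- def _focus_project_key(title: str) -> str:
--     return " ".join(_plain_text(title).lower().split())
--
-- def _featured_project_match(records: list[dict], selected_name: str) -> dict | None:
--     selected_key = _focus_project_key(selected_name)
--     if not selected_key:
--         return records[0] if records else None
--
--     exact = [
--         record
--         for record in records
--         if _focus_project_key(str(record.get("title") or "")) == selected_key
--     ]
--     if exact:
--         return exact[0]
--
--     fuzzy = [
--         record
--         for record in records
--         if selected_key in _focus_project_key(str(record.get("title") or ""))
--         or _focus_project_key(str(record.get("title") or "")) in selected_key
--     ]
--     return fuzzy[0] if fuzzy else None
-- ===== SOURCE B (Python) =====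
-- def _plain_text(value: object) -> str:
--     text = str(value or "")
--     replacements = {
--         "\u2010": "-",
--         "\u2011": "-",
--         "\u2012": "-",
--         "\u2013": "-",
--         "\u2014": "-",
--         "\u2212": "-",
--         "\u00b7": "/",
--         "\u2022": "*",
--         "\u2018": "'",
--         "\u2019": "'",
--         "\u201c": '"',
--         "\u201d": '"',
--         "\u2026": "...",
--     }
--     for old, new in replacements.items():
--         text = text.replace(old, new)
--     return " ".join(text.split())
--
-- def _focus_project_key(title: str) -> str:
--     return " ".join(_plain_text(title).lower().split())
--
-- def _featured_project_match(records: list[dict], selected_name: str) -> dict | None: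
--     selected_key = _focus_project_key(selected_name)
--     if not selected_key:
--         return records[0] if records else None
--     fuzzy_match = None
--     for record in records:
--         key = _focus_project_key(str(record.get("title") or ""))
--         if key == selected_key:
--             return record
--         if fuzzy_match is None and (selected_key in key or key in selected_key):
--             fuzzy_match = record
--     return fuzzy_match
-- ===== Notes on version B (the rewrite author's own statement) =====
-- stated objective: simpler
-- what changed: Replaces the two list-building comprehension scans (which recompute each record's key up to three times) by a single pass that computes each key once, returns immediately on the first exact match and keeps at most one stored fuzzy candidate.
import Mathlib
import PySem

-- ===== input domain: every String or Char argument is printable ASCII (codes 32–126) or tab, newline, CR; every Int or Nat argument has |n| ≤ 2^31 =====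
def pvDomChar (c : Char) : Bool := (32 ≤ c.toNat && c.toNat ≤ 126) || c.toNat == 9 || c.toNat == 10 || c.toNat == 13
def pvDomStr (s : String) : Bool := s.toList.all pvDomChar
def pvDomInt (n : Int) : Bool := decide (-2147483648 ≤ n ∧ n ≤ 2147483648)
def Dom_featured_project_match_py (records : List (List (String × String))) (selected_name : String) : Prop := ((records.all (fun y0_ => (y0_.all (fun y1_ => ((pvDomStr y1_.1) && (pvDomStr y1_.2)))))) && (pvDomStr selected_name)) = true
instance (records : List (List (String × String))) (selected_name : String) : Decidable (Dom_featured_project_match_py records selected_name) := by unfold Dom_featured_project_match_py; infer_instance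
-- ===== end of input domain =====

-- B: one pass that computes each record's key once, returns on the first exact match
-- and keeps at most one fuzzy candidate — simpler than A's two list-building scans.


-- ===== PORT A =====
-- shared module helper _plain_text (value is always a str here; str(s or "") = s)
def pvPlainText (value : String) : String :=
  let text := value
  let replacements : List (String × String) :=
    [("\u2010", "-"), ("\u2011", "-"), ("\u2012", "-"), ("\u2013", "-"),
     ("\u2014", "-"), ("\u2212", "-"), ("\u00b7", "/"), ("\u2022", "*"),
     ("\u2018", "'"), ("\u2019", "'"), ("\u201c", "\""), ("\u201d", "\""),
     ("\u2026", "...")]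
  let text := replacements.foldl (fun t p => PySem.Str.replace t p.1 p.2) text
  PySem.Str.join " " (PySem.Str.split₀ text)

-- shared module helper _focus_project_key
def pvFocusKey (title : String) : String :=
  PySem.Str.join " " (PySem.Str.split₀ (PySem.Str.lower (pvPlainText title)))

-- str(record.get("title") or "")
def pvTitleKey (record : List (String × String)) : String :=
  pvFocusKey (((PySem.Dict.ofList record).get? "title").getD "")

def featured_project_match_py (records : List (List (String × String))) (selected_name : String) : Option (List (String × String)) :=
  let selected_key := pvFocusKey selected_name
  if selected_key == "" then records.head?
  else
    let exact := records.filter (fun record => pvTitleKey record == selected_key)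
    if exact ≠ [] then exact.head?
    else
      let fuzzy := records.filter (fun record =>
        PySem.Str.isIn selected_key (pvTitleKey record) || PySem.Str.isIn (pvTitleKey record) selected_key)
      fuzzy.head?

-- ===== PORT B =====
-- the single-pass loop of Source B: early return on exact match, first fuzzy candidate kept
def pvFpmLoop (selected_key : String) (fuzzy_match : Option (List (String × String))) :
    List (List (String × String)) → Option (List (String × String))
  | [] => fuzzy_match
  | record :: rest =>
    let key := pvTitleKey record
    if key == selected_key then some record
    else
      pvFpmLoop selected_key
        (if fuzzy_match == none && (PySem.Str.isIn selected_key key || PySem.Str.isIn key selected_key)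
         then some record else fuzzy_match) rest

def featured_project_match_py_alt (records : List (List (String × String))) (selected_name : String) : Option (List (String × String)) :=
  let selected_key := pvFocusKey selected_name
  if selected_key == "" then records.head?
  else pvFpmLoop selected_key none records

-- ===== PRECONDITION & SPEC =====
def Spec_featured_project_match_py (records : List (List (String × String))) (selected_name : String) (out : Option (List (String × String))) : Prop := out = featured_project_match_py_alt records selected_name
instance (records : List (List (String × String))) (selected_name : String) (out : Option (List (String × String))) : Decidable (Spec_featured_project_match_py records selected_name out) := by unfold Spec_featured_project_match_py; infer_instance

-- ===== CLAIM (what is proved, stated in full; the proofs are below) =====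
def Claim_equal_featured_project_match_py : Prop := ∀ (records : List (List (String × String))) (selected_name : String), Dom_featured_project_match_py records selected_name → Spec_featured_project_match_py records selected_name (featured_project_match_py records selected_name)

-- ===== LEMMAS AND PROOFS =====

-- loop invariant: the single pass returns the first exact match if any, otherwise the
-- already-stored fuzzy candidate, otherwise the first fuzzy match of the remaining list
theorem pvFpmLoop_eq (sk : String) (fz : Option (List (String × String)))
    (l : List (List (String × String))) :
    pvFpmLoop sk fz l =
      match l.find? (fun r => pvTitleKey r == sk) with
      | some e => some e
      | none => fz.or (l.find? (fun r =>
          PySem.Str.isIn sk (pvTitleKey r) || PySem.Str.isIn (pvTitleKey r) sk)) := by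
  induction l generalizing fz with
  | nil => cases fz <;> simp [pvFpmLoop]
  | cons r rest ih =>
    by_cases hx : pvTitleKey r == sk
    · simp [pvFpmLoop, hx, List.find?]
    · have hx' : (pvTitleKey r == sk) = false := by simpa using hx
      simp only [pvFpmLoop, hx', Bool.false_eq_true, if_false, ih]
      rw [List.find?_cons_of_neg (by simp [hx'])]
      cases hres : rest.find? (fun r => pvTitleKey r == sk) with
      | some e => simp
      | none =>
        cases fz with
        | some x => simp
        | none =>
          rw [List.find?_cons]
          cases h1 : PySem.Str.isIn sk (pvTitleKey r) <;>
            cases h2 : PySem.Str.isIn (pvTitleKey r) sk <;> simp [h1, h2]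

theorem head?_filter_eq_find? {α : Type} (p : α → Bool) (l : List α) :
    (l.filter p).head? = l.find? p := by
  induction l with
  | nil => rfl
  | cons x xs ih => by_cases h : p x <;> simp [List.find?_cons, h, ih]

-- ===== VERDICT (by name: the statement is the Claim_ definition above) =====
theorem featured_project_match_py_spec : Claim_equal_featured_project_match_py := by
  intro records selected_name _
  unfold Spec_featured_project_match_py featured_project_match_py featured_project_match_py_alt
  by_cases h0 : pvFocusKey selected_name == ""
  · simp [h0]
  · simp only [h0, pvFpmLoop_eq, Option.none_or, head?_filter_eq_find?]
    cases hres : records.find? (fun r => pvTitleKey r == pvFocusKey selected_name) with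
    | some e =>
      have : records.filter (fun r => pvTitleKey r == pvFocusKey selected_name) ≠ [] := by
        intro hnil
        rw [← head?_filter_eq_find?, hnil] at hres
        simp at hres
      simp [this]
    | none =>
      have : records.filter (fun r => pvTitleKey r == pvFocusKey selected_name) = [] := by
        rw [List.filter_eq_nil_iff]
        intro a ha
        have := List.find?_eq_none.mp hres a ha
        simpa using this
      simp [this]
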